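-- pv_equiv track=rewrite | github.com/marmitar/MC458-Lista-6 | code/03.py | ternary_dp
-- ===== SOURCE A (Python) =====
-- def ternary_dp(n: int) -> int:
--     res = [-1] * (n + 1)
--     res[0] = 0
--
--     for i in range(1, n + 1):
--         if i % 3 == 0:
--             ans = res[i // 3]
--         elif i % 3 == 1:
--             ans = res[(i - 1) // 3]
--         else:
--             ans = res[(i + 1) // 3]
--
--         res[i] = ans + 1
--
--     return res[n] - 1
-- ===== SOURCE B (Python) =====
-- def ternary_dp(n: int) -> int:
--     def steps(i: int) -> int:
--         if i == 0:
--             return 0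
--         if i % 3 == 2:
--             return steps((i + 1) // 3) + 1
--         return steps(i // 3) + 1
--     return steps(n) - 1
-- ===== Notes on version B (the rewrite author's own statement) =====
-- stated objective: faster
-- what changed: B recurses along the single dependency chain, dividing the index by three each step, instead of filling the whole DP table up to n.
import Mathlib
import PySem

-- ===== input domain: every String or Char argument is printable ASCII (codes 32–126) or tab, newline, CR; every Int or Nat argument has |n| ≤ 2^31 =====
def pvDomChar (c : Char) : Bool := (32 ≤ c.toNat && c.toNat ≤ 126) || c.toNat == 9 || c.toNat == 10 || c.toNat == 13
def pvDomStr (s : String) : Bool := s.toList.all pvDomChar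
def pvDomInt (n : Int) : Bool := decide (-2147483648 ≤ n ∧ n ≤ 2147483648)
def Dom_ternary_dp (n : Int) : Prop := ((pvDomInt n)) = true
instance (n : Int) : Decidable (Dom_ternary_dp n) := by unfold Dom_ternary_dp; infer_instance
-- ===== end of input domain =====

-- B replaces A's full DP table with direct recursion along the single dependency
-- chain, dividing the index by three each step; objective: faster (asymptotic).

-- ===== PORT A =====
def ternary_dp (n : Int) : Int :=
  let res : List Int := List.replicate (n + 1).toNat (-1)
  let res := PySem.List.pySetD res 0 0
  let res := (PySem.List.pyRange 1 (n + 1) 1).foldl (fun res i =>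
    let ans :=
      if PySem.Int.mod i 3 = 0 then PySem.List.pyGetD res (PySem.Int.floordiv i 3) (-1)
      else if PySem.Int.mod i 3 = 1 then PySem.List.pyGetD res (PySem.Int.floordiv (i - 1) 3) (-1)
      else PySem.List.pyGetD res (PySem.Int.floordiv (i + 1) 3) (-1)
    PySem.List.pySetD res i (ans + 1)) res
  PySem.List.pyGetD res n (-1) - 1

-- ===== PORT B =====
-- fuel only makes the recursion structural; n.natAbs + 1 always exceeds the chain length
def stepsB (fuel : Nat) (i : Int) : Int :=
  match fuel with
  | 0 => 0
  | fuel + 1 =>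
    if i = 0 then 0
    else if PySem.Int.mod i 3 = 2 then stepsB fuel (PySem.Int.floordiv (i + 1) 3) + 1
    else stepsB fuel (PySem.Int.floordiv i 3) + 1

def ternary_dp_alt (n : Int) : Int := stepsB (n.natAbs + 1) n - 1

-- ===== PRECONDITION & SPEC =====
-- Pre_ excludes exactly the negative n, on which A raises IndexError (writing into an empty table).
def Pre_ternary_dp (n : Int) : Prop := 0 ≤ n
instance (n : Int) : Decidable (Pre_ternary_dp n) := by unfold Pre_ternary_dp; infer_instance
def pvWitness_ternary_dp : Int := 5

def Spec_ternary_dp (n : Int) (out : Int) : Prop := out = ternary_dp_alt n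
instance (n : Int) (out : Int) : Decidable (Spec_ternary_dp n out) := by unfold Spec_ternary_dp; infer_instance

-- ===== CLAIM (what is proved, stated in full; the proofs are below) =====
def Claim_equal_ternary_dp : Prop := ∀ (n : Int), Dom_ternary_dp n → Pre_ternary_dp n → Spec_ternary_dp n (ternary_dp n)

-- ===== LEMMAS AND PROOFS =====

-- the common dependency chain: the next index of the reduction
def nxt (k : Nat) : Nat := if k % 3 = 2 then (k + 1) / 3 else k / 3

theorem nxt_lt (k : Nat) (h : 0 < k) : nxt k < k := by unfold nxt; split <;> omega

-- reference count: number of reduction steps from k down to 0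
def gsteps : Nat → Int
  | 0 => 0
  | k + 1 => gsteps (nxt (k + 1)) + 1
  decreasing_by exact nxt_lt _ (Nat.succ_pos k)

theorem gsteps_pos (k : Nat) (h : 0 < k) : gsteps k = gsteps (nxt k) + 1 := by
  cases k with
  | zero => omega
  | succ m => rw [gsteps]

-- B's recursion computes gsteps whenever the fuel exceeds the argument
theorem stepsB_eq_gsteps : ∀ (fuel : Nat) (i : Int), 0 ≤ i → i.toNat < fuel →
    stepsB fuel i = gsteps i.toNat := by
  intro fuel
  induction fuel with
  | zero => intro i _ h; omega
  | succ f ih =>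
    intro i hi hf
    rw [stepsB]
    by_cases h0 : i = 0
    · simp [h0, gsteps]
    · rw [PySem.Int.mod_eq_emod_of_pos (by norm_num : (0:Int) < 3),
        PySem.Int.floordiv_eq_ediv_of_pos (by norm_num : (0:Int) < 3),
        PySem.Int.floordiv_eq_ediv_of_pos (by norm_num : (0:Int) < 3)]
      have hpos : 0 < i := lt_of_le_of_ne hi (Ne.symm h0)
      rw [gsteps_pos i.toNat (by omega)]
      by_cases hm : i % 3 = 2
      · have h1 : (0:Int) ≤ (i+1)/3 := by omega
        have h2 : ((i+1)/3).toNat < f := by omega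
        have hmN : i.toNat % 3 = 2 := by omega
        have h3 : ((i + 1) / 3).toNat = nxt i.toNat := by unfold nxt; rw [if_pos hmN]; omega
        rw [if_neg h0, if_pos hm, ih ((i + 1) / 3) h1 h2, h3]
      · have h1 : (0:Int) ≤ i/3 := by omega
        have h2 : (i/3).toNat < f := by omega
        have hmN : ¬ i.toNat % 3 = 2 := by omega
        have h3 : (i / 3).toNat = nxt i.toNat := by unfold nxt; rw [if_neg hmN]; omega
        rw [if_neg h0, if_neg hm, ih (i / 3) h1 h2, h3]

-- the DP table of A after processing indices 1..t
def model (N t : Nat) : List Int :=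
  (List.range (N + 1)).map (fun j => if j = 0 then 0 else if j ≤ t then gsteps j else -1)

theorem set_map_range (m : Nat) (f : Nat → Int) (k : Nat) (v : Int) (hk : k < m) :
    ((List.range m).map f).set k v = (List.range m).map (fun j => if j = k then v else f j) := by
  apply List.ext_getElem
  · simp
  · intro n h1 h2
    simp only [List.getElem_set, List.getElem_map, List.getElem_range]
    rcases eq_or_ne n k with rfl | hn
    · simp
    · simp [hn, Ne.symm hn]

theorem model_read (N t : Nat) (j : Int) (hj : 0 ≤ j) (hjt : j.toNat ≤ t) (htN : t ≤ N) :
    PySem.List.pyGetD (model N t) j (-1) = gsteps j.toNat := by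
  rw [PySem.List.pyGetD_eq_getElem (model N t) (-1) hj (by simp [model]; omega)]
  simp only [model, List.getElem_map, List.getElem_range]
  split_ifs with h1
  · simp [h1, gsteps]
  · rfl

theorem model_step (N t : Nat) (ht : t < N) :
    (fun res (i : Int) =>
      let ans :=
        if PySem.Int.mod i 3 = 0 then PySem.List.pyGetD res (PySem.Int.floordiv i 3) (-1)
        else if PySem.Int.mod i 3 = 1 then PySem.List.pyGetD res (PySem.Int.floordiv (i - 1) 3) (-1)
        else PySem.List.pyGetD res (PySem.Int.floordiv (i + 1) 3) (-1)
      PySem.List.pySetD res i (ans + 1)) (model N t) ((t : Int) + 1) = model N (t + 1) := by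
  simp only
  rw [PySem.Int.mod_eq_emod_of_pos (by norm_num : (0:Int) < 3),
      PySem.Int.floordiv_eq_ediv_of_pos (by norm_num : (0:Int) < 3),
      PySem.Int.floordiv_eq_ediv_of_pos (by norm_num : (0:Int) < 3),
      PySem.Int.floordiv_eq_ediv_of_pos (by norm_num : (0:Int) < 3)]
  set i : Int := (t : Int) + 1 with hi
  set k : Nat := t + 1 with hk
  have hik : i = (k : Int) := by omega
  have hans : (if i % 3 = 0 then PySem.List.pyGetD (model N t) (i / 3) (-1)
      else if i % 3 = 1 then PySem.List.pyGetD (model N t) ((i - 1) / 3) (-1)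
      else PySem.List.pyGetD (model N t) ((i + 1) / 3) (-1)) = gsteps (nxt k) := by
    by_cases h0 : i % 3 = 0
    · rw [if_pos h0, model_read N t _ (by omega) (by omega) (by omega)]
      congr 1; unfold nxt
      have : ¬ k % 3 = 2 := by omega
      rw [if_neg this]; omega
    · by_cases h1 : i % 3 = 1
      · rw [if_neg h0, if_pos h1, model_read N t _ (by omega) (by omega) (by omega)]
        congr 1; unfold nxt
        have : ¬ k % 3 = 2 := by omega
        rw [if_neg this]; omega
      · rw [if_neg h0, if_neg h1, model_read N t _ (by omega) (by omega) (by omega)]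
        congr 1; unfold nxt
        have : k % 3 = 2 := by omega
        rw [if_pos this]; omega
  rw [hans, ← gsteps_pos k (by omega),
      PySem.List.pySetD_of_nonneg (model N t) (gsteps k) (by omega)]
  have hik2 : i.toNat = k := by omega
  rw [hik2]
  unfold model
  rw [set_map_range _ _ _ _ (by omega)]
  congr 1
  funext j
  by_cases hjk : j = k <;> by_cases hj0 : j = 0 <;> simp_all <;> omega

theorem loop_invariant (N : Nat) : ∀ t : Nat, t ≤ N →
    (PySem.List.pyRange 1 ((t : Int) + 1) 1).foldl (fun res i =>
      let ans :=
        if PySem.Int.mod i 3 = 0 then PySem.List.pyGetD res (PySem.Int.floordiv i 3) (-1)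
        else if PySem.Int.mod i 3 = 1 then PySem.List.pyGetD res (PySem.Int.floordiv (i - 1) 3) (-1)
        else PySem.List.pyGetD res (PySem.Int.floordiv (i + 1) 3) (-1)
      PySem.List.pySetD res i (ans + 1)) (model N 0) = model N t := by
  intro t
  induction t with
  | zero => intro _; rw [PySem.List.pyRange_one_eq_nil (by omega)]; rfl
  | succ t ih =>
    intro ht
    have hc : ((t + 1 : Nat) : Int) + 1 = ((t : Int) + 1) + 1 := by push_cast; ring
    rw [hc, PySem.List.pyRange_one_succ_right (by omega : (1:Int) ≤ (t : Int) + 1),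
        List.foldl_append, ih (by omega)]
    simp only [List.foldl_cons, List.foldl_nil]
    exact model_step N t (by omega)

theorem init_model (N : Nat) :
    PySem.List.pySetD (List.replicate (N + 1) (-1) : List Int) 0 0 = model N 0 := by
  rw [PySem.List.pySetD_of_nonneg _ _ (by omega)]
  apply List.ext_getElem
  · simp [model]
  · intro i h1 h2
    simp only [model, List.getElem_set, List.getElem_map, List.getElem_range,
      List.getElem_replicate, Int.toNat_zero]
    by_cases hi : i = 0 <;> simp [hi] <;> omega

theorem a_eq (n : Int) (hn : 0 ≤ n) : ternary_dp n = gsteps n.toNat - 1 := by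
  unfold ternary_dp
  simp only
  have h1 : (n + 1).toNat = n.toNat + 1 := by omega
  have h2 : n + 1 = ((n.toNat : Int)) + 1 := by omega
  rw [h1, init_model, h2, loop_invariant n.toNat n.toNat le_rfl,
      model_read n.toNat n.toNat n hn le_rfl le_rfl]

theorem b_eq (n : Int) (hn : 0 ≤ n) : ternary_dp_alt n = gsteps n.toNat - 1 := by
  unfold ternary_dp_alt
  rw [stepsB_eq_gsteps (n.natAbs + 1) n hn (by omega)]

-- ===== VERDICT =====
theorem ternary_dp_spec : Claim_equal_ternary_dp := by
  intro n _ hp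
  unfold Spec_ternary_dp
  rw [a_eq n hp, b_eq n hp]
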